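-- pv_equiv track=rewrite | github.com/RubenZeni/DataPyLab | Recursividad/Ejercicio22.py | usar_la_fuerza
-- ===== SOURCE A (Python) =====
-- def usar_la_fuerza(mochila):
--     if not mochila:
--         return ("No quedan objetos en la mochila.")
--     objeto = mochila.pop()
--     if objeto == "sable de luz":
--         return (f"Encontraste el sable de luz. Fue necesario sacar {len(mochila)} objetos para lograrlo.")
--     else:
--         return usar_la_fuerza(mochila)
-- ===== SOURCE B (Python) =====
-- def usar_la_fuerza(mochila):
--     while mochila:
--         objeto = mochila.pop()
--         if objeto == "sable de luz":
--             return f"Encontraste el sable de luz. Fue necesario sacar {len(mochila)} objetos para lograrlo."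
--     return "No quedan objetos en la mochila."
-- ===== Notes on version B (the rewrite author's own statement) =====
-- stated objective: idiomatic
-- what changed: Replaces the tail recursion with a single iterative while-loop that pops from the end, folding the empty and exhausted cases into one post-loop return.
import Mathlib
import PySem

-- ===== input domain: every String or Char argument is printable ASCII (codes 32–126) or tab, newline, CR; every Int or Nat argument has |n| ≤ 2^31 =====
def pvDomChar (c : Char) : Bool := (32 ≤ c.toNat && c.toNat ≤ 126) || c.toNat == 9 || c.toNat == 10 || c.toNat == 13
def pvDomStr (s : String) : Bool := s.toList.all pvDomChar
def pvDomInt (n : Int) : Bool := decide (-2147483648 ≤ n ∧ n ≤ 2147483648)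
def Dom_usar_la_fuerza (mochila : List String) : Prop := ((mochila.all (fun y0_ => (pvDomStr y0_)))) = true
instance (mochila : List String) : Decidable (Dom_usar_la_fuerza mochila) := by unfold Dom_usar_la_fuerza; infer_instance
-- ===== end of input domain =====

-- B replaces A's tail recursion by an iterative end-popping loop (same return value;
-- both Pythons consume the argument list in place — equivalence here is about the return value).

-- ===== PORT A =====
-- A: if empty return the "no objects" message; else pop the last element, return the
-- success message with the post-pop length if it is the sable, else recurse.
def usar_la_fuerza (mochila : List String) : String :=
  if h : mochila = [] then "No quedan objetos en la mochila."
  else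
    -- mochila.pop() on a nonempty list: last element, list becomes dropLast
    let objeto := mochila.getLast h
    let rest := mochila.dropLast
    if objeto = "sable de luz" then
      "Encontraste el sable de luz. Fue necesario sacar " ++ PySem.Int.toStr (rest.length : Int) ++ " objetos para lograrlo."
    else usar_la_fuerza rest
termination_by mochila.length
decreasing_by
  have : mochila.length ≠ 0 := fun hz => h (List.eq_nil_of_length_eq_zero hz)
  simp [List.length_dropLast]
  omega

-- ===== PORT B =====
-- B: while-loop popping from the end = structural loop over the reversed list.
def usar_la_fuerza_altLoop : List String → String
  | [] => "No quedan objetos en la mochila."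
  | objeto :: rest =>
    if objeto = "sable de luz" then
      "Encontraste el sable de luz. Fue necesario sacar " ++ PySem.Int.toStr (rest.length : Int) ++ " objetos para lograrlo."
    else usar_la_fuerza_altLoop rest

def usar_la_fuerza_alt (mochila : List String) : String :=
  usar_la_fuerza_altLoop mochila.reverse

-- ===== PRECONDITION & SPEC =====
def Spec_usar_la_fuerza (mochila : List String) (out : String) : Prop := out = usar_la_fuerza_alt mochila
instance (mochila : List String) (out : String) : Decidable (Spec_usar_la_fuerza mochila out) := by unfold Spec_usar_la_fuerza; infer_instance

-- ===== CLAIM (what is proved, stated in full; the proofs are below) =====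
def Claim_equal_usar_la_fuerza : Prop := ∀ (mochila : List String), Dom_usar_la_fuerza mochila → Spec_usar_la_fuerza mochila (usar_la_fuerza mochila)

-- ===== LEMMAS AND PROOFS =====
theorem usar_la_fuerza_eq_loop (r : List String) : usar_la_fuerza r.reverse = usar_la_fuerza_altLoop r := by
  induction r with
  | nil =>
    rw [usar_la_fuerza]
    simp [usar_la_fuerza_altLoop]
  | cons o rest ih =>
    rw [List.reverse_cons, usar_la_fuerza]
    have hne : rest.reverse ++ [o] ≠ [] := by simp
    rw [dif_neg hne]
    rw [usar_la_fuerza_altLoop]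
    simp only [List.getLast_append_singleton, List.dropLast_concat, List.length_reverse]
    split_ifs with h
    · rfl
    · simpa using ih

-- ===== VERDICT (by name: the statement is the Claim_ definition above) =====
theorem usar_la_fuerza_spec : Claim_equal_usar_la_fuerza := by
  intro mochila _
  unfold Spec_usar_la_fuerza usar_la_fuerza_alt
  simpa using usar_la_fuerza_eq_loop mochila.reverse
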